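-- pv_equiv track=rewrite | github.com/amulyakamshetty/MachineLearning | quiz2-amulyakamshetty-master/quiz2-amulyakamshetty-master/quiz3_q2a_ml.py | mini
-- ===== SOURCE A (Python) =====
-- def mini(matrix):
--     p=[0,0]
--     mn=1000
--     for i in range(0,len(matrix)):
--         for j in range(0,len(matrix[i])):
--             if (matrix[i][j]>0 and matrix[i][j]<mn):
--                 mn=matrix[i][j]
--                 p[0]=i
--                 p[1]=j
--     return p
-- ===== SOURCE B (Python) =====
-- def mini(matrix):
--     cands = [(v, i, j)
--              for i, row in enumerate(matrix)
--              for j, v in enumerate(row)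
--              if 0 < v < 1000]
--     if not cands:
--         return [0, 0]
--     v, i, j = min(cands)
--     return [i, j]
-- ===== Notes on version B (the rewrite author's own statement) =====
-- stated objective: alternative
-- what changed: Replaced the incremental best-so-far state machine (nested index loops mutating p and mn) with a collect-then-reduce pass: build the list of (value,i,j) candidate triples with 0<value<1000 and take its lexicographic minimum, which reproduces the strict-< first-occurrence tie-break.
import Mathlib
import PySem

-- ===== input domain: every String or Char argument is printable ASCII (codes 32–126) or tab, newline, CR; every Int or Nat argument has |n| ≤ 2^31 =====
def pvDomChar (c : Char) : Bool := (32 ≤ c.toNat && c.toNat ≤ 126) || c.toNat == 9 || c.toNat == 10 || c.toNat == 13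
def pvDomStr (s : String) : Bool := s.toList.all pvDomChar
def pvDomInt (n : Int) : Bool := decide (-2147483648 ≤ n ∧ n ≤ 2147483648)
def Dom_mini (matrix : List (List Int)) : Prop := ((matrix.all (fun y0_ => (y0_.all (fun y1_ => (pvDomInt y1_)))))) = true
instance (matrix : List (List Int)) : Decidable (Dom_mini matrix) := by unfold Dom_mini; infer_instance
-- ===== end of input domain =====

-- B replaces A's incremental best-so-far nested index loops with a collect-candidates-then-reduce
-- pass (lexicographic minimum of (value,i,j) triples); same asymptotic cost, different decomposition.

-- ===== PORT A =====
-- state (mn, p0, p1); indices i, j always in range, so pyGetD reads matrix[i] / row[j] exactly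
def mini (matrix : List (List Int)) : List Int :=
  let st := (PySem.List.pyRange 0 (PySem.List.len matrix) 1).foldl
    (fun (s : Int × Int × Int) i =>
      let row := PySem.List.pyGetD matrix i []
      (PySem.List.pyRange 0 (PySem.List.len row) 1).foldl
        (fun (s : Int × Int × Int) j =>
          let v := PySem.List.pyGetD row j 0
          if v > 0 ∧ v < s.1 then (v, i, j) else s) s)
    ((1000 : Int), (0 : Int), (0 : Int))
  [st.2.1, st.2.2]

-- ===== PORT B =====
-- lexicographic < on (v, i, j) triples: the order Python's min uses on the candidate tuples
def lt3 (a b : Int × Int × Int) : Bool :=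
  decide (a.1 < b.1 ∨ (a.1 = b.1 ∧ (a.2.1 < b.2.1 ∨ (a.2.1 = b.2.1 ∧ a.2.2 < b.2.2))))

def mini_alt (matrix : List (List Int)) : List Int :=
  let cands := (PySem.List.enumerate matrix 0).flatMap
    (fun p => ((PySem.List.enumerate p.2 0).filter (fun q => 0 < q.2 ∧ q.2 < 1000)).map
      (fun q => (q.2, p.1, q.1)))
  match cands with
  | [] => [0, 0]
  | h :: t =>
      let m := t.foldl (fun acc x => if lt3 x acc then x else acc) h
      [m.2.1, m.2.2]

-- ===== PRECONDITION & SPEC =====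
def Spec_mini (matrix : List (List Int)) (out : List Int) : Prop := out = mini_alt matrix
instance (matrix : List (List Int)) (out : List Int) : Decidable (Spec_mini matrix out) := by unfold Spec_mini; infer_instance

-- ===== CLAIM (what is proved, stated in full; the proofs are below) =====
def Claim_equal_mini : Prop := ∀ (matrix : List (List Int)), Dom_mini matrix → Spec_mini matrix (mini matrix)

-- ===== LEMMAS AND PROOFS =====

def stepA (s t : Int × Int × Int) : Int × Int × Int := if t.1 > 0 ∧ t.1 < s.1 then t else s
def stepB (s t : Int × Int × Int) : Int × Int × Int :=
  if (0 < t.1 ∧ t.1 < 1000) ∧ lt3 t s then t else s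
def stepM (s t : Int × Int × Int) : Int × Int × Int := if lt3 t s then t else s

def posLe (s t : Int × Int × Int) : Prop := s.2.1 < t.2.1 ∨ (s.2.1 = t.2.1 ∧ s.2.2 ≤ t.2.2)
def posLt (s t : Int × Int × Int) : Prop := s.2.1 < t.2.1 ∨ (s.2.1 = t.2.1 ∧ s.2.2 < t.2.2)

def rowCells (i : Int) (row : List Int) : List (Int × Int × Int) :=
  (PySem.List.enumerate row 0).map (fun q => (q.2, i, q.1))

def cells (matrix : List (List Int)) (s : Int) : List (Int × Int × Int) :=
  (PySem.List.enumerate matrix s).flatMap (fun p => rowCells p.1 p.2)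

lemma mem_cells (matrix : List (List Int)) (s : Int) (t : Int × Int × Int)
    (h : t ∈ cells matrix s) : s ≤ t.2.1 ∧ 0 ≤ t.2.2 := by
  simp only [cells, rowCells, List.mem_flatMap, List.mem_map] at h
  obtain ⟨p, hp, q, hq, rfl⟩ := h
  rw [PySem.List.mem_enumerate_iff] at hp hq
  obtain ⟨k, _, rfl⟩ := hp
  obtain ⟨k', _, rfl⟩ := hq
  simp

lemma pairwise_cells (matrix : List (List Int)) (s : Int) :
    (cells matrix s).Pairwise posLt := by
  induction matrix generalizing s with
  | nil => simp [cells]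
  | cons r rs ih =>
    have hc : cells (r :: rs) s = rowCells s r ++ cells rs (s + 1) := by
      simp [cells, PySem.List.enumerate_cons]
    rw [hc, List.pairwise_append]
    refine ⟨?_, ih (s + 1), ?_⟩
    · have := PySem.List.pairwise_lt_enumerate (xs := r) (s := (0 : Int))
      unfold rowCells
      exact List.Pairwise.map _ (fun a b hab => by simp [posLt]; omega) this
    · intro a ha b hb
      have hb' := mem_cells rs (s + 1) b hb
      have ha' : a.2.1 = s := by
        simp only [rowCells, List.mem_map] at ha
        obtain ⟨q, _, rfl⟩ := ha
        rfl
      exact Or.inl (by omega)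

lemma foldl_stepA_eq_stepB (cs : List (Int × Int × Int)) :
    ∀ (s : Int × Int × Int), cs.Pairwise posLt → (∀ t ∈ cs, posLe s t) → s.1 ≤ 1000 →
    cs.foldl stepA s = cs.foldl stepB s := by
  induction cs with
  | nil => intros; rfl
  | cons h tl ih =>
    intro s hpw hle hub
    rw [List.pairwise_cons] at hpw
    have hsh := hle h (List.mem_cons_self ..)
    by_cases hc : h.1 > 0 ∧ h.1 < s.1
    · have hA : stepA s h = h := by simp [stepA, hc]
      have hB : stepB s h = h := by
        have h1 : 0 < h.1 ∧ h.1 < 1000 := ⟨hc.1, by omega⟩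
        have h2 : lt3 h s = true := by
          simp only [lt3, decide_eq_true_eq]; exact Or.inl hc.2
        simp [stepB, h1, h2]
      simp only [List.foldl_cons, hA, hB]
      exact ih h hpw.2 (fun t ht => by
        have := hpw.1 t ht
        unfold posLt at this; unfold posLe; omega) (by omega)
    · have hA : stepA s h = s := by simp [stepA, hc]
      have hB : stepB s h = s := by
        unfold stepB
        rw [if_neg]
        rintro ⟨⟨h1, _⟩, h2⟩
        simp only [lt3, decide_eq_true_eq] at h2
        unfold posLe at hsh
        rcases h2 with h2 | ⟨heq, h2⟩
        · exact hc ⟨h1, h2⟩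
        · omega
      simp only [List.foldl_cons, hA, hB]
      exact ih s hpw.2 (fun t ht => hle t (List.mem_cons_of_mem _ ht)) hub

lemma foldl_stepB_eq_filter (cs : List (Int × Int × Int)) :
    ∀ (s : Int × Int × Int),
    cs.foldl stepB s = (cs.filter (fun t => decide (0 < t.1 ∧ t.1 < 1000))).foldl stepM s := by
  induction cs with
  | nil => intro s; rfl
  | cons h tl ih =>
    intro s
    by_cases hp : 0 < h.1 ∧ h.1 < 1000
    · have : stepB s h = stepM s h := by simp [stepB, stepM, hp]
      simp [List.foldl_cons, hp, this, ih]
    · have : stepB s h = s := by simp [stepB, hp]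
      simp [List.foldl_cons, hp, this, ih]

lemma rowCells_foldA (i : Int) (row : List Int) (s : Int × Int × Int) :
    (rowCells i row).foldl stepA s =
      (PySem.List.pyRange 0 (PySem.List.len row) 1).foldl
        (fun (s : Int × Int × Int) j =>
          let v := PySem.List.pyGetD row j 0
          if v > 0 ∧ v < s.1 then (v, i, j) else s) s := by
  unfold rowCells
  rw [List.foldl_map, PySem.List.enumerate_eq_map_pyRange (d := (0 : Int)), List.foldl_map]
  rfl

lemma mini_eq_cells_fold (matrix : List (List Int)) :
    mini matrix = [((cells matrix 0).foldl stepA (1000, 0, 0)).2.1,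
                   ((cells matrix 0).foldl stepA (1000, 0, 0)).2.2] := by
  have key : (cells matrix 0).foldl stepA ((1000 : Int), (0 : Int), (0 : Int)) =
      (PySem.List.pyRange 0 (PySem.List.len matrix) 1).foldl
        (fun (s : Int × Int × Int) i =>
          let row := PySem.List.pyGetD matrix i []
          (PySem.List.pyRange 0 (PySem.List.len row) 1).foldl
            (fun (s : Int × Int × Int) j =>
              let v := PySem.List.pyGetD row j 0
              if v > 0 ∧ v < s.1 then (v, i, j) else s) s)
        ((1000 : Int), (0 : Int), (0 : Int)) := by
    unfold cells
    rw [List.foldl_flatMap, PySem.List.enumerate_eq_map_pyRange (d := ([] : List Int)),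
        List.foldl_map]
    congr 1
    funext s i
    exact rowCells_foldA i (PySem.List.pyGetD matrix i []) s
  have hA : mini matrix =
      [((PySem.List.pyRange 0 (PySem.List.len matrix) 1).foldl
        (fun (s : Int × Int × Int) i =>
          let row := PySem.List.pyGetD matrix i []
          (PySem.List.pyRange 0 (PySem.List.len row) 1).foldl
            (fun (s : Int × Int × Int) j =>
              let v := PySem.List.pyGetD row j 0
              if v > 0 ∧ v < s.1 then (v, i, j) else s) s)
        ((1000 : Int), (0 : Int), (0 : Int))).2.1,
       ((PySem.List.pyRange 0 (PySem.List.len matrix) 1).foldl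
        (fun (s : Int × Int × Int) i =>
          let row := PySem.List.pyGetD matrix i []
          (PySem.List.pyRange 0 (PySem.List.len row) 1).foldl
            (fun (s : Int × Int × Int) j =>
              let v := PySem.List.pyGetD row j 0
              if v > 0 ∧ v < s.1 then (v, i, j) else s) s)
        ((1000 : Int), (0 : Int), (0 : Int))).2.2] := rfl
  rw [hA, ← key]

lemma mini_alt_eq (matrix : List (List Int)) :
    mini_alt matrix =
      match (cells matrix 0).filter (fun t => decide (0 < t.1 ∧ t.1 < 1000)) with
      | [] => [0, 0]
      | h :: t => [(t.foldl stepM h).2.1, (t.foldl stepM h).2.2] := by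
  unfold mini_alt cells rowCells
  have hfm : ∀ (p : Int × List Int),
      ((PySem.List.enumerate p.2 0).filter (fun q => 0 < q.2 ∧ q.2 < 1000)).map
        (fun q => (q.2, p.1, q.1)) =
      ((PySem.List.enumerate p.2 0).map (fun q => (q.2, p.1, q.1))).filter
        (fun t => decide (0 < t.1 ∧ t.1 < 1000)) := by
    intro p
    rw [List.filter_map]
    rfl
  simp only [hfm, ← List.filter_flatMap]
  rfl

-- ===== VERDICT (by name: the statement is the Claim_ definition above) =====
theorem mini_spec : Claim_equal_mini := by
  intro matrix _
  unfold Spec_mini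
  rw [mini_eq_cells_fold, mini_alt_eq]
  rw [foldl_stepA_eq_stepB (cells matrix 0) (1000, 0, 0) (pairwise_cells matrix 0)
      (fun t ht => by
        have := mem_cells matrix 0 t ht
        unfold posLe
        simp only
        omega)
      (by norm_num)]
  rw [foldl_stepB_eq_filter]
  rcases hc : (cells matrix 0).filter (fun t => decide (0 < t.1 ∧ t.1 < 1000)) with _ | ⟨h, t⟩
  · rw [hc]; rfl
  · rw [hc]
    have hh : h ∈ (cells matrix 0).filter (fun t => decide (0 < t.1 ∧ t.1 < 1000)) := by
      rw [hc]; exact List.mem_cons_self ..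
    rw [List.mem_filter] at hh
    have hlt : lt3 h (1000, 0, 0) = true := by
      simp only [lt3, decide_eq_true_eq]
      left
      have := hh.2
      simp only [decide_eq_true_eq] at this
      exact this.2
    rw [List.foldl_cons, show stepM (1000, 0, 0) h = h from by simp [stepM, hlt]]
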